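-- pv_equiv track=rewrite | github.com/iug-htw/GPTAndPrejudice | circuits_cli.py | naive_tokenize
-- ===== SOURCE A (Python) =====
-- from typing import List, Tuple
--
-- def naive_tokenize(texts: List[str]) -> List[List[int]]:
--     vocab = {}
--     next_id = 0
--     out = []
--     for t in texts:
--         ids = []
--         for w in t.split():
--             if w not in vocab:
--                 vocab[w] = next_id
--                 next_id += 1
--             ids.append(vocab[w])
--         out.append(ids)
--     return out
-- ===== SOURCE B (Python) =====
-- def naive_tokenize(texts):
--     vocab = {}
--     for t in texts:
--         for w in t.split():
--             vocab.setdefault(w, len(vocab))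
--     return [[vocab[w] for w in t.split()] for t in texts]
-- ===== Notes on version B (the rewrite author's own statement) =====
-- stated objective: alternative
-- what changed: Replaces A's single fused pass (interleaved vocab growth, id counter and output building) by two separately-shaped passes: first build the complete vocab with setdefault(w, len(vocab)), then produce the output as a nested comprehension looking up the finished table.
import Mathlib
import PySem

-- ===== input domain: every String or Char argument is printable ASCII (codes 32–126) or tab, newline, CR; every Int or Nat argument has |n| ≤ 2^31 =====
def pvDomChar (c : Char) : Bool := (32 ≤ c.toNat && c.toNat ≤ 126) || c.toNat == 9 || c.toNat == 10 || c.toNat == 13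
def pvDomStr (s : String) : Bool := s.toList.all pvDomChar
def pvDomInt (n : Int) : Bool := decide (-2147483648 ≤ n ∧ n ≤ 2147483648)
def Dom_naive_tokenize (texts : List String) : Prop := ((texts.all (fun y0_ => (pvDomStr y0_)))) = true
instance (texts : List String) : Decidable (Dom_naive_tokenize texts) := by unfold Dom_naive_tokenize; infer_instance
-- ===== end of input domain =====

-- B replaces A's single fused pass by two separate passes (build the full vocab, then look up); alternative decomposition, same cost.


-- ===== PORT A =====
-- inner-loop body: grow vocab on first sight (counter next_id), append vocab[w]
def tokStep (s : PySem.Dict String Int × Int × List Int) (w : String) :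
    PySem.Dict String Int × Int × List Int :=
  let p := if s.1.contains w then (s.1, s.2.1) else (s.1.insert w s.2.1, s.2.1 + 1)
  (p.1, p.2, s.2.2 ++ [p.1.getD w 0])   -- vocab[w]: w is always present here, so getD is exact

def naive_tokenize (texts : List String) : List (List Int) :=
  (texts.foldl
    (fun (st : PySem.Dict String Int × Int × List (List Int)) t =>
      let r := (PySem.Str.split₀ t).foldl tokStep (st.1, st.2.1, [])
      (r.1, r.2.1, st.2.2 ++ [r.2.2]))
    (PySem.Dict.empty, 0, [])).2.2

-- ===== PORT B =====
def vocabStep (v : PySem.Dict String Int) (w : String) : PySem.Dict String Int :=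
  v.setdefault w (v.size : Int)

def buildVocab (texts : List String) : PySem.Dict String Int :=
  texts.foldl (fun v t => (PySem.Str.split₀ t).foldl vocabStep v) PySem.Dict.empty

def naive_tokenize_alt (texts : List String) : List (List Int) :=
  let vocab := buildVocab texts
  texts.map (fun t => (PySem.Str.split₀ t).map (fun w => vocab.getD w 0))
  -- vocab[w]: every word is present in the finished vocab, so getD is exact

-- ===== PRECONDITION & SPEC =====
def Spec_naive_tokenize (texts : List String) (out : List (List Int)) : Prop := out = naive_tokenize_alt texts
instance (texts : List String) (out : List (List Int)) : Decidable (Spec_naive_tokenize texts out) := by unfold Spec_naive_tokenize; infer_instance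

-- ===== CLAIM (what is proved, stated in full; the proofs are below) =====
def Claim_equal_naive_tokenize : Prop := ∀ (texts : List String), Dom_naive_tokenize texts → Spec_naive_tokenize texts (naive_tokenize texts)

-- ===== LEMMAS AND PROOFS =====

-- one setdefault step never changes an existing binding
lemma vocabStep_get?_stable (v : PySem.Dict String Int) (u w : String) (i : Int)
    (h : v.get? w = some i) : (vocabStep v u).get? w = some i := by
  unfold vocabStep
  by_cases hc : v.contains u = true
  · rw [PySem.Dict.setdefault_of_contains _ _ hc]; exact h
  · rw [PySem.Dict.setdefault_of_not_contains _ _ (by simpa using hc)]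
    have hne : w ≠ u := by
      intro e; subst e
      rw [PySem.Dict.contains_eq_isSome_get?] at hc
      simp [h] at hc
    rw [PySem.Dict.get?_insert_of_ne _ _ hne]; exact h

lemma innerV_get?_stable (ws : List String) : ∀ (v : PySem.Dict String Int) (w : String) (i : Int),
    v.get? w = some i → (ws.foldl vocabStep v).get? w = some i := by
  induction ws with
  | nil => intro v w i h; simpa using h
  | cons u ws ih =>
      intro v w i h
      exact ih _ _ _ (vocabStep_get?_stable v u w i h)

lemma foldV_get?_stable (ts : List String) : ∀ (v : PySem.Dict String Int) (w : String) (i : Int),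
    v.get? w = some i →
    (ts.foldl (fun v t => (PySem.Str.split₀ t).foldl vocabStep v) v).get? w = some i := by
  induction ts with
  | nil => intro v w i h; simpa using h
  | cons t ts ih =>
      intro v w i h
      exact ih _ _ _ (innerV_get?_stable _ _ _ _ h)

-- after a setdefault step the word is bound
lemma vocabStep_contains_self (v : PySem.Dict String Int) (w : String) :
    ∃ i, (vocabStep v w).get? w = some i := by
  unfold vocabStep
  by_cases hc : v.contains w = true
  · rw [PySem.Dict.setdefault_of_contains _ _ hc]
    rw [PySem.Dict.contains_eq_isSome_get?] at hc
    cases h : v.get? w with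
    | none => rw [h] at hc; simp at hc
    | some i => exact ⟨i, rfl⟩
  · rw [PySem.Dict.setdefault_of_not_contains _ _ (by simpa using hc)]
    exact ⟨_, PySem.Dict.get?_insert_self _ _ _⟩

lemma innerV_contains_of_mem (ws : List String) : ∀ (v : PySem.Dict String Int) (w : String),
    w ∈ ws → ∃ i, (ws.foldl vocabStep v).get? w = some i := by
  induction ws with
  | nil => intro v w h; cases h
  | cons u ws ih =>
      intro v w h
      rcases List.mem_cons.mp h with rfl | h
      · obtain ⟨i, hi⟩ := vocabStep_contains_self v w
        exact ⟨i, innerV_get?_stable ws _ _ _ hi⟩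
      · exact ih _ _ h

-- one A-step equals one B-vocab-step plus the lookup, given next_id = len(vocab)
lemma tokStep_eq (v : PySem.Dict String Int) (ids : List Int) (w : String) :
    tokStep (v, (v.size : Int), ids) w =
      (vocabStep v w, ((vocabStep v w).size : Int), ids ++ [(vocabStep v w).getD w 0]) := by
  unfold tokStep vocabStep
  by_cases hc : v.contains w = true
  · simp [hc, PySem.Dict.setdefault_of_contains _ _ hc]
  · have hc' : v.contains w = false := by simpa using hc
    simp [hc', PySem.Dict.setdefault_of_not_contains _ _ hc',
      PySem.Dict.size_insert, Int.add_comm]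

-- A's inner loop = B's vocab pass over the words + lookups in the resulting vocab
lemma inner_main (ws : List String) : ∀ (v : PySem.Dict String Int) (ids : List Int),
    ws.foldl tokStep (v, (v.size : Int), ids) =
      (ws.foldl vocabStep v, (((ws.foldl vocabStep v).size : Int)),
        ids ++ ws.map (fun w => (ws.foldl vocabStep v).getD w 0)) := by
  induction ws with
  | nil => intro v ids; simp
  | cons w ws ih =>
      intro v ids
      have hstep := tokStep_eq v ids w
      simp only [List.foldl_cons, hstep, ih]
      obtain ⟨i, hi⟩ := vocabStep_contains_self v w
      have hV : (ws.foldl vocabStep (vocabStep v w)).get? w = some i :=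
        innerV_get?_stable ws _ _ _ hi
      have h1 : (vocabStep v w).getD w 0 = (ws.foldl vocabStep (vocabStep v w)).getD w 0 := by
        rw [PySem.Dict.getD_of_get?_eq_some _ _ hi, PySem.Dict.getD_of_get?_eq_some _ _ hV]
      simp [h1, List.map_cons]

-- A's outer loop = B's vocab pass over the texts + lookups in the resulting vocab
lemma outer_main (ts : List String) : ∀ (v : PySem.Dict String Int) (out : List (List Int)),
    ts.foldl
      (fun (st : PySem.Dict String Int × Int × List (List Int)) t =>
        let r := (PySem.Str.split₀ t).foldl tokStep (st.1, st.2.1, [])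
        (r.1, r.2.1, st.2.2 ++ [r.2.2]))
      (v, (v.size : Int), out) =
    (ts.foldl (fun v t => (PySem.Str.split₀ t).foldl vocabStep v) v,
     ((ts.foldl (fun v t => (PySem.Str.split₀ t).foldl vocabStep v) v).size : Int),
     out ++ ts.map (fun t => (PySem.Str.split₀ t).map
        (fun w => (ts.foldl (fun v t => (PySem.Str.split₀ t).foldl vocabStep v) v).getD w 0))) := by
  induction ts with
  | nil => intro v out; simp
  | cons t ts ih =>
      intro v out
      simp only [List.foldl_cons, inner_main (PySem.Str.split₀ t) v []]
      rw [ih]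
      have hids : (PySem.Str.split₀ t).map
            (fun w => ((PySem.Str.split₀ t).foldl vocabStep v).getD w 0) =
          (PySem.Str.split₀ t).map
            (fun w => (ts.foldl (fun v t => (PySem.Str.split₀ t).foldl vocabStep v)
                ((PySem.Str.split₀ t).foldl vocabStep v)).getD w 0) := by
        apply List.map_congr_left
        intro w hw
        obtain ⟨i, hi⟩ := innerV_contains_of_mem (PySem.Str.split₀ t) v w hw
        have hV := foldV_get?_stable ts _ _ _ hi
        rw [PySem.Dict.getD_of_get?_eq_some _ _ hi, PySem.Dict.getD_of_get?_eq_some _ _ hV]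
      simp [hids, List.map_cons]

-- ===== VERDICT (by name: the statement is the Claim_ definition above) =====
theorem naive_tokenize_spec : Claim_equal_naive_tokenize := by
  intro texts _
  unfold Spec_naive_tokenize naive_tokenize
  conv_lhs => rw [show (0 : Int) = ((PySem.Dict.empty : PySem.Dict String Int).size : Int) by
    simp [PySem.Dict.size_empty]]
  rw [outer_main texts PySem.Dict.empty []]
  simp [naive_tokenize_alt, buildVocab]
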